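-- pv_equiv track=rewrite | github.com/SquirtlesAlgorithmStudy/SquirtlesAlgorithmStudy-Hard | 민서/봉인된주문.py | s2n
-- ===== SOURCE A (Python) =====
-- def s2n(string):
--     n = 0
--     b = 1
--     for _ in string:
--         n += b
--         b *= 26
--     b = 1
--     for c in reversed(string):
--         n += b * (ord(c) - ord('a'))
--         b *= 26
--     return n
-- ===== SOURCE B (Python) =====
-- def s2n(string):
--     n = 0
--     for c in string:
--         n = n * 26 + (ord(c) - ord('a') + 1)
--     return n
-- ===== Notes on version B (the rewrite author's own statement) =====
-- stated objective: simpler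
-- what changed: Replaced A's two separate power-accumulating passes (one summing 26^i, one over reversed(string) summing weighted offsets) by a single left-to-right Horner pass with the bijective +1 folded into each digit.
import Mathlib
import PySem

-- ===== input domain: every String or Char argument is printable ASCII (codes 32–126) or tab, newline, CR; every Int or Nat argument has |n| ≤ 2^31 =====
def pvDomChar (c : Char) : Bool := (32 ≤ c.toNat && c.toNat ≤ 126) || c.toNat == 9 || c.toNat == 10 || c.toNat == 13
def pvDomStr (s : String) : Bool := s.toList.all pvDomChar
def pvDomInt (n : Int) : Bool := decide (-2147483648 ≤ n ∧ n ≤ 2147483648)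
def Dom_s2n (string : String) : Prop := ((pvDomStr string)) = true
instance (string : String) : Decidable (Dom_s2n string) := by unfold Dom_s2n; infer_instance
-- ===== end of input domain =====

-- B replaces A's two power-accumulating passes by a single left-to-right Horner pass (simpler).


-- ===== PORT A =====
-- first loop: for _ in string: n += b; b *= 26   ; second loop over reversed(string)
def s2n (string : String) : Int :=
  let p1 := string.toList.foldl (fun (p : Int × Int) _ => (p.1 + p.2, p.2 * 26)) (0, 1)
  let p2 := string.toList.reverse.foldl
      (fun (p : Int × Int) c => (p.1 + p.2 * ((c.toNat : Int) - 97), p.2 * 26)) (p1.1, 1)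
  p2.1

-- ===== PORT B =====
-- single Horner pass: n = n*26 + (ord(c) - ord('a') + 1)
def s2n_alt (string : String) : Int :=
  string.toList.foldl (fun n c => n * 26 + ((c.toNat : Int) - 97 + 1)) 0

-- ===== PRECONDITION & SPEC =====
def Spec_s2n (string : String) (out : Int) : Prop := out = s2n_alt string
instance (string : String) (out : Int) : Decidable (Spec_s2n string out) := by unfold Spec_s2n; infer_instance

-- ===== CLAIM (what is proved, stated in full; the proofs are below) =====
def Claim_equal_s2n : Prop := ∀ (string : String), Dom_s2n string → Spec_s2n string (s2n string)

-- ===== LEMMAS AND PROOFS =====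

-- Σ_{i<k} 26^i
def pvOnes : Nat → Int
  | 0 => 0
  | k + 1 => 1 + 26 * pvOnes k

-- offsets of a list read with weights 1, 26, 26², …
def pvW : List Char → Int
  | [] => 0
  | c :: cs => ((c.toNat : Int) - 97) + 26 * pvW cs

theorem pvFold1 (l : List Char) : ∀ n b : Int,
    l.foldl (fun (p : Int × Int) _ => (p.1 + p.2, p.2 * 26)) (n, b)
      = (n + b * pvOnes l.length, b * 26 ^ l.length) := by
  induction l with
  | nil => intro n b; simp [pvOnes]
  | cons c cs ih =>
      intro n b
      simp only [List.foldl_cons, ih, List.length_cons, pvOnes, pow_succ]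
      exact Prod.ext (by ring) (by ring)

theorem pvFold2 (m : List Char) : ∀ n b : Int,
    (m.foldl (fun (p : Int × Int) c => (p.1 + p.2 * ((c.toNat : Int) - 97), p.2 * 26)) (n, b)).1
      = n + b * pvW m := by
  induction m with
  | nil => intro n b; simp [pvW]
  | cons c cs ih =>
      intro n b
      simp only [List.foldl_cons, ih, pvW]
      ring

theorem pvW_append (m : List Char) (c : Char) :
    pvW (m ++ [c]) = pvW m + 26 ^ m.length * ((c.toNat : Int) - 97) := by
  induction m with
  | nil => simp [pvW]
  | cons d ds ih =>
      simp only [List.cons_append, pvW, ih, List.length_cons, pow_succ]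
      ring

theorem pvOnes_succ' (k : Nat) : 26 ^ k + pvOnes k = pvOnes (k + 1) := by
  induction k with
  | zero => simp [pvOnes]
  | succ j ih =>
      rw [show (26:Int) ^ (j+1) + pvOnes (j+1) = 1 + 26 * (26 ^ j + pvOnes j) by simp [pvOnes, pow_succ]; ring, ih]
      simp [pvOnes]

theorem pvHornerShift (l : List Char) : ∀ n : Int,
    l.foldl (fun n c => n * 26 + ((c.toNat : Int) - 97 + 1)) n
      = n * 26 ^ l.length + l.foldl (fun n c => n * 26 + ((c.toNat : Int) - 97 + 1)) 0 := by
  induction l with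
  | nil => intro n; simp
  | cons c cs ih =>
      intro n
      simp only [List.foldl_cons, List.length_cons, pow_succ]
      rw [ih (n * 26 + ((c.toNat : Int) - 97 + 1)), ih (0 * 26 + ((c.toNat : Int) - 97 + 1))]
      ring

theorem pvHorner (l : List Char) :
    l.foldl (fun n c => n * 26 + ((c.toNat : Int) - 97 + 1)) 0
      = pvOnes l.length + pvW l.reverse := by
  induction l with
  | nil => simp [pvOnes, pvW]
  | cons c cs ih =>
      simp only [List.foldl_cons, List.reverse_cons, List.length_cons]
      rw [pvHornerShift, ih, pvW_append, List.length_reverse, ← pvOnes_succ' cs.length]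
      ring

-- ===== VERDICT (by name: the statement is the Claim_ definition above) =====
theorem s2n_spec : Claim_equal_s2n := by
  intro s _
  show s2n s = s2n_alt s
  rw [s2n, s2n_alt, pvFold1, pvFold2, pvHorner]
  ring
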